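-- pv_equiv track=rewrite | github.com/UniversalMachina/linki-endpoints | Prompt-to-Carousal/infographics2.py | split_text_with_colors
-- ===== SOURCE A (Python) =====
-- def split_text_with_colors(text):
--     parts = []
--     current_part = ""
--     inside_brackets = False
--
--     for char in text:
--         if char == '<':
--             if current_part:
--                 parts.append((current_part, "white"))
--             current_part = ""
--             inside_brackets = True
--         elif char == '>':
--             if current_part:
--                 parts.append((current_part, "pastel_orange"))
--             current_part = ""
--             inside_brackets = False
--         else:
--             current_part += char
--
--     if current_part:
--         color = "pastel_orange" if inside_brackets else "white"
--         parts.append((current_part, color))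
--
--     return parts
-- ===== SOURCE B (Python) =====
-- def split_text_with_colors(text):
--     out = []
--     i = 0
--     n = len(text)
--     while i < n:
--         j = i
--         while j < n and text[j] != '<' and text[j] != '>':
--             j += 1
--         piece = text[i:j]
--         if piece:
--             if j < n:
--                 color = "white" if text[j] == '<' else "pastel_orange"
--             else:
--                 color = "pastel_orange" if i > 0 and text[i - 1] == '<' else "white"
--             out.append((piece, color))
--         i = j + 1
--     return out
-- ===== Notes on version B (the rewrite author's own statement) =====
-- stated objective: alternative
-- what changed: Replaces A's char-by-char accumulator with an inside_brackets flag by a span scan that jumps from delimiter to delimiter, coloring each piece from the following delimiter (the trailing piece from the preceding one).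
import Mathlib
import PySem

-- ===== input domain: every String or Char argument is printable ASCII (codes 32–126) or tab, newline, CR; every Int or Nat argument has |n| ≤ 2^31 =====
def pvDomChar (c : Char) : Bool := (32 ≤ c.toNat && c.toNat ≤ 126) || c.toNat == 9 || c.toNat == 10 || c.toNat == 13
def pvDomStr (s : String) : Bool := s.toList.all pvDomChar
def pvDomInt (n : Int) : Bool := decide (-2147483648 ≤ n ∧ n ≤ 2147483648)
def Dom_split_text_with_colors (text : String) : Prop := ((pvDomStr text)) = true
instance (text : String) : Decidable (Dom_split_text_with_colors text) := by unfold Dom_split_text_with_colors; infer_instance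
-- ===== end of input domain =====

-- B is a different decomposition of the same exact task: instead of A's char-by-char
-- accumulator with an inside_brackets flag, B scans delimiter-to-delimiter (span jumps)
-- and colors each piece from the adjacent delimiter; same cost, same results.

-- ===== PORT A =====
-- loop body of A's for-loop: state = (parts, current_part as List Char, inside_brackets)
def pvAStep (s : List (String × String) × List Char × Bool) (c : Char) :
    List (String × String) × List Char × Bool :=
  let (parts, cur, ins) := s
  if c = '<' then
    ((if cur ≠ [] then parts ++ [(String.ofList cur, "white")] else parts), [], true)
  else if c = '>' then
    ((if cur ≠ [] then parts ++ [(String.ofList cur, "pastel_orange")] else parts), [], false)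
  else
    (parts, cur ++ [c], ins)

def split_text_with_colors (text : String) : List (String × String) :=
  let st := text.toList.foldl pvAStep ([], [], false)
  if st.2.1 ≠ [] then
    st.1 ++ [(String.ofList st.2.1, if st.2.2 then "pastel_orange" else "white")]
  else st.1

-- ===== PORT B =====
-- Source B's inner while condition: chars that are not '<' or '>'
def pvNotDelim (c : Char) : Bool := c != '<' && c != '>'

-- Source B's outer while loop: `prev` is the delimiter text[i-1] just consumed (none when i = 0)
def pvBGo (cs : List Char) (prev : Option Char) : List (String × String) :=
  match h : cs.dropWhile pvNotDelim with
  | [] =>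
      let piece := cs.takeWhile pvNotDelim
      if piece = [] then []
      else [(String.ofList piece, if prev = some '<' then "pastel_orange" else "white")]
  | d :: rest =>
      let piece := cs.takeWhile pvNotDelim
      (if piece = [] then []
       else [(String.ofList piece, if d = '<' then "white" else "pastel_orange")]) ++
      pvBGo rest (some d)
termination_by cs.length
decreasing_by
  have := List.length_dropWhile_le pvNotDelim cs
  rw [h] at this
  simp at this ⊢
  omega

def split_text_with_colors_alt (text : String) : List (String × String) :=
  pvBGo text.toList none

-- ===== PRECONDITION & SPEC =====
def Spec_split_text_with_colors (text : String) (out : List (String × String)) : Prop := out = split_text_with_colors_alt text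
instance (text : String) (out : List (String × String)) : Decidable (Spec_split_text_with_colors text out) := by unfold Spec_split_text_with_colors; infer_instance

-- ===== CLAIM (what is proved, stated in full; the proofs are below) =====
def Claim_equal_split_text_with_colors : Prop := ∀ (text : String), Dom_split_text_with_colors text → Spec_split_text_with_colors text (split_text_with_colors text)

-- ===== LEMMAS AND PROOFS =====

-- recursive characterization of A's loop
def pvG (cs : List Char) (cur : List Char) (ins : Bool) : List (String × String) :=
  match cs with
  | [] => if cur = [] then [] else [(String.ofList cur, if ins then "pastel_orange" else "white")]
  | c :: cs' =>
    if c = '<' then (if cur = [] then [] else [(String.ofList cur, "white")]) ++ pvG cs' [] true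
    else if c = '>' then (if cur = [] then [] else [(String.ofList cur, "pastel_orange")]) ++ pvG cs' [] false
    else pvG cs' (cur ++ [c]) ins

-- pvBGo with the pending accumulator `cur` merged into the first piece
def pvH (cur : List Char) (cs : List Char) (prev : Option Char) : List (String × String) :=
  match h : cs.dropWhile pvNotDelim with
  | [] =>
      let piece := cur ++ cs.takeWhile pvNotDelim
      if piece = [] then []
      else [(String.ofList piece, if prev = some '<' then "pastel_orange" else "white")]
  | d :: rest =>
      let piece := cur ++ cs.takeWhile pvNotDelim
      (if piece = [] then []
       else [(String.ofList piece, if d = '<' then "white" else "pastel_orange")]) ++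
      pvH [] rest (some d)
termination_by cs.length
decreasing_by
  have := List.length_dropWhile_le pvNotDelim cs
  rw [h] at this
  simp at this ⊢
  omega

lemma pvH_drop_nil (cur cs : List Char) (prev : Option Char)
    (h : List.dropWhile pvNotDelim cs = []) :
    pvH cur cs prev =
      (if cur ++ cs.takeWhile pvNotDelim = [] then []
       else [(String.ofList (cur ++ cs.takeWhile pvNotDelim),
              if prev = some '<' then "pastel_orange" else "white")]) := by
  rw [pvH]; split <;> simp_all

lemma pvH_drop_cons (cur cs : List Char) (prev : Option Char) (d : Char) (rest : List Char)
    (h : List.dropWhile pvNotDelim cs = d :: rest) :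
    pvH cur cs prev =
      (if cur ++ cs.takeWhile pvNotDelim = [] then []
       else [(String.ofList (cur ++ cs.takeWhile pvNotDelim),
              if d = '<' then "white" else "pastel_orange")]) ++ pvH [] rest (some d) := by
  rw [pvH]; split <;> simp_all

lemma pvBGo_drop_nil (cs : List Char) (prev : Option Char)
    (h : List.dropWhile pvNotDelim cs = []) :
    pvBGo cs prev =
      (if cs.takeWhile pvNotDelim = [] then []
       else [(String.ofList (cs.takeWhile pvNotDelim),
              if prev = some '<' then "pastel_orange" else "white")]) := by
  rw [pvBGo]; split <;> simp_all

lemma pvBGo_drop_cons (cs : List Char) (prev : Option Char) (d : Char) (rest : List Char)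
    (h : List.dropWhile pvNotDelim cs = d :: rest) :
    pvBGo cs prev =
      (if cs.takeWhile pvNotDelim = [] then []
       else [(String.ofList (cs.takeWhile pvNotDelim),
              if d = '<' then "white" else "pastel_orange")]) ++ pvBGo rest (some d) := by
  rw [pvBGo]; split <;> simp_all

lemma foldA (cs : List Char) : ∀ (parts : List (String × String)) (cur : List Char) (ins : Bool),
    (let st := cs.foldl pvAStep (parts, cur, ins)
     if st.2.1 ≠ [] then
       st.1 ++ [(String.ofList st.2.1, if st.2.2 then "pastel_orange" else "white")]
     else st.1)
    = parts ++ pvG cs cur ins := by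
  induction cs with
  | nil => intro parts cur ins; simp [pvG]; split_ifs <;> simp_all
  | cons c cs' ih =>
    intro parts cur ins
    by_cases h1 : c = '<'
    · simp [pvAStep, h1, pvG, ih]
      try split_ifs <;> simp_all
    · by_cases h2 : c = '>'
      · simp [pvAStep, h1, h2, pvG, ih]
        try split_ifs <;> simp_all
      · simp [pvAStep, h1, h2, pvG, ih]

lemma g_eq_h (cs : List Char) : ∀ (cur : List Char) (prev : Option Char),
    pvG cs cur (decide (prev = some '<')) = pvH cur cs prev := by
  induction cs with
  | nil =>
    intro cur prev
    rw [pvH_drop_nil _ _ _ (by simp)]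
    simp [pvG]
  | cons c cs' ih =>
    intro cur prev
    by_cases h1 : c = '<'
    · have hd : List.dropWhile pvNotDelim (c :: cs') = c :: cs' := by
        simp [List.dropWhile_cons, pvNotDelim, h1]
      rw [pvH_drop_cons _ _ _ _ _ hd]
      have := ih [] (some '<'); simp at this
      simp [pvG, h1, List.takeWhile_cons, pvNotDelim, this]
    · by_cases h2 : c = '>'
      · have hd : List.dropWhile pvNotDelim (c :: cs') = c :: cs' := by
          simp [List.dropWhile_cons, pvNotDelim, h2]
        rw [pvH_drop_cons _ _ _ _ _ hd]
        have := ih [] (some '>'); simp at this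
        simp [pvG, h1, h2, List.takeWhile_cons, pvNotDelim, this]
      · have hnd : pvNotDelim c = true := by simp [pvNotDelim, h1, h2]
        have hgoal : pvG (c :: cs') cur (decide (prev = some '<'))
            = pvH (cur ++ [c]) cs' prev := by
          simp only [pvG, if_neg h1, if_neg h2]; exact ih (cur ++ [c]) prev
        rw [hgoal]
        have hdw : List.dropWhile pvNotDelim (c :: cs') = List.dropWhile pvNotDelim cs' := by
          simp [List.dropWhile_cons, hnd]
        have htw : List.takeWhile pvNotDelim (c :: cs') = c :: List.takeWhile pvNotDelim cs' := by
          simp [List.takeWhile_cons, hnd]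
        cases hdd : List.dropWhile pvNotDelim cs' with
        | nil =>
          rw [pvH_drop_nil _ _ _ hdd, pvH_drop_nil _ _ _ (hdw.trans hdd), htw]
          simp
        | cons d rest =>
          rw [pvH_drop_cons _ _ _ _ _ hdd, pvH_drop_cons _ _ _ _ _ (hdw.trans hdd), htw]
          simp

lemma h_eq_bgo (cs : List Char) (prev : Option Char) : pvH [] cs prev = pvBGo cs prev := by
  induction cs, prev using pvBGo.induct with
  | case1 cs prev h _ =>
    rw [pvH_drop_nil _ _ _ h, pvBGo_drop_nil _ _ h]; simp
  | case2 cs prev h _ =>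
    rw [pvH_drop_nil _ _ _ h, pvBGo_drop_nil _ _ h]; simp
  | case3 cs prev d rest h ih =>
    rw [pvH_drop_cons _ _ _ _ _ h, pvBGo_drop_cons _ _ _ _ h, ih]; simp

-- ===== VERDICT (by name: the statement is the Claim_ definition above) =====
theorem split_text_with_colors_spec : Claim_equal_split_text_with_colors := by
  intro text _
  show _ = _
  unfold split_text_with_colors split_text_with_colors_alt
  rw [foldA text.toList [] [] false]
  have hg := g_eq_h text.toList [] none
  simp only [show (decide ((none : Option Char) = some '<')) = false from rfl] at hg
  rw [hg, h_eq_bgo]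
  simp
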